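-- pv_equiv track=rewrite | github.com/dmis-lab/SeqTagQA | preprocessing/utils.py | smartLower
-- ===== SOURCE A (Python) =====
-- def smartLower(answer):
--     """
--     Lowercased comparison, but rule-based exceptions are applied
--        to handle some entities, such as BRCA1,... , by comparing them as cased comparison
--     """
--     if len(answer)==1:
--         return answer
--     ansList = answer.split()
--     for subans in ansList:
--         if sum(1 for c in subans[1:] if c.isupper()) > 0: # should be c.isupper() -> 20201029 update
--             return answer
--     return answer.lower()
-- ===== SOURCE B (Python) =====
-- def smartLower(answer):
--     if len(answer) == 1:
--         return answer
--     if any(c.isupper() and not p.isspace() for p, c in zip(answer, answer[1:])):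
--         return answer
--     return answer.lower()
-- ===== Notes on version B (the rewrite author's own statement) =====
-- stated objective: simpler
-- what changed: Replaces splitting into a word list and counting uppercase letters in each word's tail by a single adjacency scan over consecutive character pairs: a mid-word uppercase is an uppercase character whose predecessor is not whitespace.
import Mathlib
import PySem

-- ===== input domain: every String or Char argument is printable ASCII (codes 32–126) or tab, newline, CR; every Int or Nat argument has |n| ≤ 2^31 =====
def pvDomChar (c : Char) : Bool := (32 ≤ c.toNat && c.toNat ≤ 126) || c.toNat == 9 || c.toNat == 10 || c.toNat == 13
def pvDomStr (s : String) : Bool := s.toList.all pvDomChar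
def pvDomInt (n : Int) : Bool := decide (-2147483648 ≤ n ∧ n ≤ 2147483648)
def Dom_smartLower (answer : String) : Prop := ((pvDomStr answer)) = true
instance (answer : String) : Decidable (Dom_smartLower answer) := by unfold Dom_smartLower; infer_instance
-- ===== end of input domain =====

-- B replaces A's word-split-and-count-tail-uppercase scan by one adjacency scan over
-- consecutive character pairs (objective: simpler).

-- ===== PORT A =====
-- the 'for subans in ansList' loop: return answer on the first word with an uppercase
-- letter past its first character, otherwise fall through to answer.lower()
def smartLowerGo (answer : String) : List String → String
  | [] => PySem.Str.lower answer
  | w :: ws =>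
      if 0 < ((PySem.Str.slice w (some 1) none).toList.filter PySem.Chars.isupper).length
      then answer else smartLowerGo answer ws

def smartLower (answer : String) : String :=
  if PySem.Str.len answer == 1 then answer
  else smartLowerGo answer (PySem.Str.split₀ answer)

-- ===== PORT B =====
def smartLower_alt (answer : String) : String :=
  if PySem.Str.len answer == 1 then answer
  else if (answer.toList.zip (PySem.List.slice answer.toList (some 1) none)).any
            (fun pc => PySem.Chars.isupper pc.2 && !PySem.Chars.isspace pc.1)
  then answer
  else PySem.Str.lower answer

-- ===== PRECONDITION & SPEC =====
def Spec_smartLower (answer : String) (out : String) : Prop := out = smartLower_alt answer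
instance (answer : String) (out : String) : Decidable (Spec_smartLower answer out) := by unfold Spec_smartLower; infer_instance

-- ===== CLAIM (what is proved, stated in full; the proofs are below) =====
def Claim_equal_smartLower : Prop := ∀ (answer : String), Dom_smartLower answer → Spec_smartLower answer (smartLower answer)

-- ===== LEMMAS AND PROOFS =====

-- "word w has an uppercase letter past its first character"
def pvW (w : List Char) : Bool := (w.drop 1).any PySem.Chars.isupper

-- recursive spec of the adjacency scan; the flag says whether we are currently inside a word
def pvSpecAny : List Char → Bool → Bool
  | [], _ => false
  | c :: rest, inWord =>
      if PySem.Chars.isspace c then pvSpecAny rest false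
      else (inWord && PySem.Chars.isupper c) || pvSpecAny rest true

lemma pv_upper_not_space (c : Char) (h : PySem.Chars.isspace c = true) :
    PySem.Chars.isupper c = false := by
  by_contra hne
  have hu : PySem.Chars.isupper c = true := by simpa using hne
  simp only [PySem.Chars.isupper, Bool.and_eq_true, decide_eq_true_eq, Char.le_def,
    UInt32.le_iff_toNat_le] at hu
  simp only [PySem.Chars.isspace, Bool.or_eq_true, Bool.and_eq_true, decide_eq_true_eq] at h
  have h1 : c.toNat = c.val.toNat := rfl
  have h2 : 'A'.val.toNat = 65 := rfl
  have h3 : 'Z'.val.toNat = 90 := rfl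
  omega

lemma pvW_append (w : List Char) (c : Char) :
    pvW (w ++ [c]) = (pvW w || (!w.isEmpty && PySem.Chars.isupper c)) := by
  cases w with
  | nil => simp [pvW]
  | cons a w' => simp [pvW, List.any_append]

lemma pv_split_go_any (cs : List Char) : ∀ (cur : List Char) (acc : List (List Char)),
    (PySem.Chars.split₀.go cs cur acc).any pvW
      = (acc.any pvW || pvW cur.reverse || pvSpecAny cs (!cur.isEmpty)) := by
  induction cs with
  | nil =>
      intro cur acc
      cases cur with
      | nil => simp [PySem.Chars.split₀.go, pvSpecAny, pvW]
      | cons a cur' =>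
          simp [PySem.Chars.split₀.go, pvSpecAny, List.any_reverse,
                Bool.or_comm, Bool.or_left_comm, Bool.or_assoc]
  | cons c rest ih =>
      intro cur acc
      by_cases hs : PySem.Chars.isspace c = true
      · cases cur with
        | nil => simp [PySem.Chars.split₀.go, hs, ih, pvSpecAny, pvW]
        | cons a cur' =>
            simp [PySem.Chars.split₀.go, hs, ih, pvSpecAny, pvW, List.any_reverse,
                  Bool.or_comm, Bool.or_left_comm, Bool.or_assoc]
      · have hs' : PySem.Chars.isspace c = false := by simpa using hs
        have h1 : pvW (c :: cur).reverse
            = (pvW cur.reverse || (!cur.isEmpty && PySem.Chars.isupper c)) := by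
          have hrev : (c :: cur).reverse = cur.reverse ++ [c] := by simp
          rw [hrev, pvW_append]
          cases cur with
          | nil => simp
          | cons a t =>
              have hne : (t.reverse ++ [a]).isEmpty = false := by
                simp [List.isEmpty_iff]
              simp [hne]
        simp only [PySem.Chars.split₀.go, hs', Bool.false_eq_true, if_false]
        rw [ih]
        simp only [pvSpecAny, hs', Bool.false_eq_true, if_false, h1]
        cases cur <;> simp [Bool.or_comm, Bool.or_left_comm, Bool.or_assoc,
                            Bool.and_comm]

lemma pv_spec_zip (cs : List Char) : ∀ (prev : Char),
    ((prev :: cs).zip cs).any (fun pc => PySem.Chars.isupper pc.2 && !PySem.Chars.isspace pc.1)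
      = pvSpecAny cs (!PySem.Chars.isspace prev) := by
  induction cs with
  | nil => intro prev; simp [pvSpecAny]
  | cons c rest ih =>
      intro prev
      rw [show ((prev :: c :: rest).zip (c :: rest)) = (prev, c) :: ((c :: rest).zip rest)
            from rfl]
      rw [List.any_cons, ih c]
      by_cases hc : PySem.Chars.isspace c = true
      · simp [pvSpecAny, hc, pv_upper_not_space c hc]
      · have hc' : PySem.Chars.isspace c = false := by simpa using hc
        simp [pvSpecAny, hc', Bool.and_comm]

lemma pvW_eq_filter (w : String) :
    (0 < ((PySem.Str.slice w (some 1) none).toList.filter PySem.Chars.isupper).length)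
      ↔ pvW w.toList = true := by
  rw [PySem.Str.toList_slice, PySem.Chars.slice_eq_listSlice,
      PySem.List.slice_from w.toList (by norm_num : (0:Int) ≤ 1)]
  simp [pvW, List.length_pos_iff, List.filter_eq_nil_iff, List.any_eq_true]

lemma pv_go_eq (answer : String) (ws : List String) :
    smartLowerGo answer ws
      = (if (ws.map String.toList).any pvW then answer else PySem.Str.lower answer) := by
  induction ws with
  | nil => simp [smartLowerGo]
  | cons w ws' ih =>
      simp only [smartLowerGo]
      by_cases h : 0 < ((PySem.Str.slice w (some 1) none).toList.filter PySem.Chars.isupper).length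
      · have hw : pvW w.toList = true := (pvW_eq_filter w).mp h
        rw [if_pos h]
        simp [hw]
      · have hw : pvW w.toList = false := by
          have := mt (pvW_eq_filter w).mpr h
          simpa using this
        rw [if_neg h, ih]
        simp [hw]

lemma pv_main (cs : List Char) :
    (PySem.Chars.split₀ cs).any pvW
      = (cs.zip (cs.drop 1)).any (fun pc => PySem.Chars.isupper pc.2 && !PySem.Chars.isspace pc.1) := by
  cases cs with
  | nil => simp [PySem.Chars.split₀, PySem.Chars.split₀.go]
  | cons c rest =>
      rw [show PySem.Chars.split₀ (c :: rest) = PySem.Chars.split₀.go (c :: rest) [] [] from rfl]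
      rw [pv_split_go_any]
      simp only [List.drop_one, List.tail_cons]
      rw [pv_spec_zip rest c]
      by_cases hs : PySem.Chars.isspace c = true
      · simp [pvSpecAny, hs, pvW]
      · have hs' : PySem.Chars.isspace c = false := by simpa using hs
        simp [pvSpecAny, hs', pvW]

-- ===== VERDICT (by name: the statement is the Claim_ definition above) =====
theorem smartLower_spec : Claim_equal_smartLower := by
  intro answer _
  unfold Spec_smartLower smartLower smartLower_alt
  by_cases h1 : (PySem.Str.len answer == 1) = true
  · rw [if_pos h1, if_pos h1]
  · rw [if_neg h1, if_neg h1]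
    rw [pv_go_eq]
    rw [PySem.List.slice_from answer.toList (by norm_num : (0:Int) ≤ 1)]
    rw [show (PySem.Str.split₀ answer).map String.toList = PySem.Chars.split₀ answer.toList
          from PySem.Str.split₀_map_toList answer]
    rw [pv_main]
    norm_num
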